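-- pv_equiv track=rewrite | github.com/Nilgol/clcp | pretrain/data/a2d2_dataset.py | _organize_paths_by_scene
-- ===== SOURCE A (Python) =====
-- from typing import List, Tuple
--
-- def _organize_paths_by_scene(lidar_paths: List[str]) -> dict:
--     """Organizes lidar paths by sequence name.
--
--     Args:
--         lidar_paths (List[str]): List of valid lidar paths.
--
--     Returns:
--         dict: Dictionary where keys are sequence names and values are lists of lidar paths.
--     """
--     scene_dict = {}
--     for path in lidar_paths:
--         seq_name = path.split("/")[-4]
--         if seq_name not in scene_dict:
--             scene_dict[seq_name] = []
--         scene_dict[seq_name].append(path)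
--     return scene_dict
-- ===== SOURCE B (Python) =====
-- from typing import List
--
--
-- def _organize_paths_by_scene(lidar_paths: List[str]) -> dict:
--     """Organizes lidar paths by sequence name (two-pass: distinct keys, then filter)."""
--     seen = []
--     for path in lidar_paths:
--         k = path.split("/")[-4]
--         if k not in seen:
--             seen.append(k)
--     return {k: [p for p in lidar_paths if p.split("/")[-4] == k] for k in seen}
-- ===== Notes on version B (the rewrite author's own statement) =====
-- stated objective: alternative
-- what changed: Instead of one pass that incrementally builds a dict of growing lists, B first collects the distinct scene keys in first-occurrence order and then builds each group with a filtering comprehension over the whole list.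
import Mathlib
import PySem

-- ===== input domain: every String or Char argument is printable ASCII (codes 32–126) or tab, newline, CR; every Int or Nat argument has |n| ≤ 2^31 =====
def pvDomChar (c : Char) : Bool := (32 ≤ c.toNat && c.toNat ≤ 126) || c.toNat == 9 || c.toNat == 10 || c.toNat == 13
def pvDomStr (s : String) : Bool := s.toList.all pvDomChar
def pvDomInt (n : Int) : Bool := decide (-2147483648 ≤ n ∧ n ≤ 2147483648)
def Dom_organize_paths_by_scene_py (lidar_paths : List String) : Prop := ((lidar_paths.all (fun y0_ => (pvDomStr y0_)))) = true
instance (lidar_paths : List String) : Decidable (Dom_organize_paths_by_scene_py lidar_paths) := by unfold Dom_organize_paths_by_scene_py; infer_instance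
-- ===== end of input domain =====

-- B replaces A's single-pass dict-of-growing-lists with a two-pass scheme (distinct scene keys
-- in first-occurrence order, then one filtering scan per key); alternative structure, not faster.


-- shared key expression of both Pythons: path.split("/")[-4]
-- (Pre_ guarantees the index is in range, so the `.getD ""` default is never taken there)
def pvKey (path : String) : String :=
  (PySem.List.pyGet? ((PySem.Str.split? path "/").getD []) (-4)).getD ""

-- ===== PORT A =====
def organize_paths_by_scene_py (lidar_paths : List String) : List (String × List String) :=
  (lidar_paths.foldl
    (fun scene_dict path =>
      let seq_name := pvKey path
      let scene_dict :=
        if scene_dict.contains seq_name then scene_dict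
        else scene_dict.insert seq_name ([] : List String)
      scene_dict.modify seq_name [] (fun l => l ++ [path]))
    (PySem.Dict.empty : PySem.Dict String (List String))).items

-- ===== PORT B =====
def organize_paths_by_scene_py_alt (lidar_paths : List String) : List (String × List String) :=
  let seen : List String :=
    lidar_paths.foldl (fun seen path =>
      let k := pvKey path
      if k ∈ seen then seen else seen ++ [k]) []
  seen.map (fun k => (k, lidar_paths.filter (fun p => pvKey p == k)))

-- ===== PRECONDITION & SPEC =====
-- Pre_ excludes exactly the inputs on which A raises IndexError: some path whose
-- '/'-split has fewer than 4 parts (B raises there too).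
def Pre_organize_paths_by_scene_py (lidar_paths : List String) : Prop :=
  ∀ p ∈ lidar_paths, 4 ≤ ((PySem.Str.split? p "/").getD []).length
instance (lidar_paths : List String) : Decidable (Pre_organize_paths_by_scene_py lidar_paths) := by unfold Pre_organize_paths_by_scene_py; infer_instance

def pvWitness_organize_paths_by_scene_py : List String :=
  ["a2d2/s1/lidar/cam/f1.npz", "a2d2/s1/lidar/cam/f2.npz", "a2d2/s2/lidar/cam/f1.npz"]

def Spec_organize_paths_by_scene_py (lidar_paths : List String) (out : List (String × List String)) : Prop := out = organize_paths_by_scene_py_alt lidar_paths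
instance (lidar_paths : List String) (out : List (String × List String)) : Decidable (Spec_organize_paths_by_scene_py lidar_paths out) := by unfold Spec_organize_paths_by_scene_py; infer_instance

-- ===== CLAIM (what is proved, stated in full; the proofs are below) =====
def Claim_equal_organize_paths_by_scene_py : Prop := ∀ (lidar_paths : List String), Dom_organize_paths_by_scene_py lidar_paths → Pre_organize_paths_by_scene_py lidar_paths → Spec_organize_paths_by_scene_py lidar_paths (organize_paths_by_scene_py lidar_paths)

-- ===== LEMMAS AND PROOFS =====

-- A's loop body, named for the proofs (definitionally the lambda in port A)
def pvStepA (d : PySem.Dict String (List String)) (path : String) :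
    PySem.Dict String (List String) :=
  let seq_name := pvKey path
  let d := if d.contains seq_name then d else d.insert seq_name ([] : List String)
  d.modify seq_name [] (fun l => l ++ [path])

lemma pvStepA_keys (d : PySem.Dict String (List String)) (p : String) :
    (pvStepA d p).keys = PySem.Set.add d.keys (pvKey p) := by
  unfold pvStepA
  by_cases hc : d.contains (pvKey p) = true
  · simp only [hc, if_true, PySem.Dict.keys_modify]
    rw [PySem.Dict.keys_insert_of_contains d _ hc,
      PySem.Set.add_of_mem ((PySem.Dict.contains_iff_mem_keys d (pvKey p)).1 hc)]
  · have hc' : d.contains (pvKey p) = false := by simpa using hc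
    simp only [hc', Bool.false_eq_true, if_false, PySem.Dict.keys_modify]
    rw [PySem.Dict.keys_insert_of_contains _ _ (PySem.Dict.contains_insert_self d _ _),
      PySem.Dict.keys_insert_of_not_contains _ _ hc',
      PySem.Set.add_of_not_mem]
    intro hmem
    exact (by simp [hc'] : ¬ d.contains (pvKey p) = true)
      ((PySem.Dict.contains_iff_mem_keys d (pvKey p)).2 hmem)

lemma pvStepA_keys_nodup (d : PySem.Dict String (List String)) (p : String)
    (h : d.keys.Nodup) : (pvStepA d p).keys.Nodup := by
  rw [pvStepA_keys]; exact PySem.Set.nodup_add _ _ h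

lemma pvStepA_getD (d : PySem.Dict String (List String)) (p k : String) :
    (pvStepA d p).getD k [] =
      if k = pvKey p then d.getD k [] ++ [p] else d.getD k [] := by
  unfold pvStepA
  by_cases hc : d.contains (pvKey p) = true
  · simp only [hc, if_true, PySem.Dict.getD_modify]
    by_cases hk : k = pvKey p
    · simp [hk]
    · simp [hk]
  · have hc' : d.contains (pvKey p) = false := by simpa using hc
    simp only [hc', PySem.Dict.getD_modify]
    by_cases hk : k = pvKey p
    · simp [hk, PySem.Dict.getD_insert_self, PySem.Dict.getD_of_not_contains _ _ hc']
    · simp [hk, PySem.Dict.getD_insert_of_ne _ _ _ hk]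

lemma pvLoopA_items (l : List String) (d : PySem.Dict String (List String))
    (h : d.keys.Nodup) :
    (l.foldl pvStepA d).items =
      (PySem.Set.update d.keys (l.map pvKey)).map
        (fun k => (k, d.getD k [] ++ l.filter (fun p => pvKey p == k))) := by
  induction l generalizing d with
  | nil =>
      simp only [List.foldl_nil, List.map_nil, PySem.Set.update_nil, List.filter_nil,
        List.append_nil]
      exact PySem.Dict.items_eq_map_keys d h []
  | cons p l ih =>
      simp only [List.foldl_cons, List.map_cons, PySem.Set.update_cons]
      rw [ih (pvStepA d p) (pvStepA_keys_nodup d p h), pvStepA_keys]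
      refine List.map_congr_left (fun k _ => ?_)
      rw [pvStepA_getD, List.filter_cons]
      by_cases hk : k = pvKey p
      · subst hk
        simp [List.append_assoc]
      · have : (pvKey p == k) = false := by
          simpa using fun e => hk e.symm
        simp [hk, this]

-- ===== VERDICT (by name: the statement is the Claim_ definition above) =====
theorem organize_paths_by_scene_py_spec : Claim_equal_organize_paths_by_scene_py := by
  intro l _ _
  show organize_paths_by_scene_py l = organize_paths_by_scene_py_alt l
  have hA : organize_paths_by_scene_py l =
      (l.foldl pvStepA (PySem.Dict.empty : PySem.Dict String (List String))).items := rfl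
  have hB : organize_paths_by_scene_py_alt l =
      (l.foldl (fun s b => PySem.Set.add s (pvKey b)) ([] : PySem.Set String)).map
        (fun k => (k, l.filter (fun p => pvKey p == k))) := by
    unfold organize_paths_by_scene_py_alt
    have hfun : (fun (seen : List String) (path : String) =>
        let k := pvKey path
        if k ∈ seen then seen else seen ++ [k]) =
        (fun (s : PySem.Set String) (b : String) => PySem.Set.add s (pvKey b)) := by
      funext s b
      rw [PySem.Set.add_eq_ite]
    rw [hfun]
  rw [hA, hB, pvLoopA_items l _ (by simp [PySem.Dict.keys_empty]),
    ← PySem.Set.update_map_eq_foldl_add]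
  simp [PySem.Dict.keys_empty, PySem.Dict.getD_empty]
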